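-- pv_equiv track=rewrite | github.com/connectwithprakash/Coding-Conquest | meta/scripts/binary_pattern_in_binary_fibonacci_counter.py | binary_fibonacci
-- ===== SOURCE A (Python) =====
-- def no_of_bits(n: int) -> int:
--     """
--     Determines the number of bits required to represent an integer.
--
--     Args:
--     - n: An integer.
--
--     Returns:
--     - int: The number of bits required to represent the integer.
--     """
--     assert isinstance(n, int), "Input must be an integer!"
--     if n == 0:
--         return 1
--     return n.bit_length()
--
-- def binary_fibonacci(n: int) -> int:
--     """
--     Calculates the binary Fibonacci number at a given index.
--
--     Args:
--     - n: An index for the binary Fibonacci sequence.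
--
--     Returns:
--     - int: The binary Fibonacci number at the specified index.
--     """
--     if n == 0:
--         return 0
--     if n == 1:
--         return 1
--     fn_2, fn_1 = 0, 1
--     for _ in range(2, n+1):
--         bit_len = no_of_bits(fn_2)
--         fn = (fn_1 << bit_len) | fn_2
--         fn_2 = fn_1
--         fn_1 = fn
--     return fn
-- ===== SOURCE B (Python) =====
-- def binary_fibonacci(n: int) -> int:
--     """Binary Fibonacci by top-down memoized recursion.
--
--     The bit length of the k-th word is the k-th Fibonacci number, so the
--     length table is precomputed by pure integer additions and the values are
--     obtained by a memoized recursion v(k) = (v(k-1) << len(k-2)) + v(k-2),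
--     with no bit_length inspection of the big integers.
--     """
--     if n == 0:
--         return 0
--     if n == 1:
--         return 1
--     lengths = [1, 1]
--     for _ in range(n - 1):
--         lengths.append(lengths[-2] + lengths[-1])
--     memo = {0: 0, 1: 1}
--
--     def value(k: int) -> int:
--         if k not in memo:
--             memo[k] = (value(k - 1) << lengths[k - 2]) + value(k - 2)
--         return memo[k]
--
--     return value(n)
-- ===== Notes on version B (the rewrite author's own statement) =====
-- stated objective: alternative
-- what changed: B first builds the table of word bit-lengths (Fibonacci numbers) by plain integer additions and then fills the values by a top-down memoized recursion with shift-and-add, instead of A's forward two-variable loop that calls bit_length on the growing big integer and combines with shift-and-or.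
import Mathlib
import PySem

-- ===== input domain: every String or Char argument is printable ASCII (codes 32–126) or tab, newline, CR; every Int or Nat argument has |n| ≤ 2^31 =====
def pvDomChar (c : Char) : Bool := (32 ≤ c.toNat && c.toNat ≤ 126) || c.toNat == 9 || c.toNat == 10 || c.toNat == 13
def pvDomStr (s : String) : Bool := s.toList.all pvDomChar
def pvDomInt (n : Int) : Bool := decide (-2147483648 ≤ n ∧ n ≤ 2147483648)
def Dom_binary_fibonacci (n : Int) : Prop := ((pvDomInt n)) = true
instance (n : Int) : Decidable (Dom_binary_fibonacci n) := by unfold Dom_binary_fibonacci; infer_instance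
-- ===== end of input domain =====

-- B precomputes the word bit-lengths as a Fibonacci table and fills values by top-down memoized
-- recursion (shift+add), instead of A's forward two-variable loop that takes bit_length of a big
-- integer each step (objective: alternative).


-- ===== PORT A =====
-- Python's int.bit_length (exact: bit_length of n ≥ 0 is Nat.log2 n + 1 for n ≠ 0)
def noOfBits (n : Int) : Int :=
  if n = 0 then 1 else ((Nat.log2 n.natAbs + 1 : Nat) : Int)

-- loop body: bit_len = no_of_bits(fn_2); fn = (fn_1 << bit_len) | fn_2; fn_2, fn_1 = fn_1, fn
-- (state = (fn_2, fn_1, fn); bit_len ≥ 1 always, so `<<` is * 2 ^ bit_len.toNat exactly)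
def stepA (st : Int × Int × Int) (_ : Nat) : Int × Int × Int :=
  let bit_len := noOfBits st.1
  let fn := Int.lor (st.2.1 * 2 ^ bit_len.toNat) st.1
  (st.2.1, fn, fn)

def binary_fibonacci (n : Int) : Int :=
  if n = 0 then 0
  else if n = 1 then 1
  else
    -- for _ in range(2, n+1): … ; return fn   (range(2, n+1) has (n-1) iterations;
    -- the third state slot is the loop-local `fn`, seeded with a placeholder for its unbound initial state)
    ((List.range' 2 (n - 1).toNat).foldl stepA (0, 1, 0)).2.2

-- ===== PORT B =====
-- lengths.append(lengths[-2] + lengths[-1])  (the list always has ≥ 2 entries,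
-- so the negative indices are positions len-2 and len-1: exact)
def stepLen (ls : List Int) (_ : Nat) : List Int :=
  ls ++ [ls.getD (ls.length - 2) 0 + ls.getD (ls.length - 1) 0]

-- def value(k): if k not in memo: memo[k] = (value(k-1) << lengths[k-2]) + value(k-2); return memo[k]
-- (structural recursion on k; for a memo miss at k = 0 or 1 — unreachable, since the initial memo
-- maps 0 and 1 — a totality guard returns the corresponding base value; the length entry is ≥ 1,
-- so `<<` is * 2 ^ toNat exactly)
def valueGo (lengths : List Int) : Nat → PySem.Dict Int Int → PySem.Dict Int Int × Int
  | k, memo =>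
    match memo.get? (k : Int) with
    | some v => (memo, v)
    | none =>
      match k with
      | 0 => (memo, 0)
      | 1 => (memo, 1)
      | Nat.succ (Nat.succ k') =>
        let r1 := valueGo lengths (k' + 1) memo
        let r2 := valueGo lengths k' r1.1
        let v := r1.2 * 2 ^ ((lengths.getD k' 0).toNat) + r2.2
        (r2.1.insert ((k' + 2 : Nat) : Int) v, v)

def binary_fibonacci_alt (n : Int) : Int :=
  if n = 0 then 0
  else if n = 1 then 1
  else
    -- lengths = [1, 1]; for _ in range(n - 1): lengths.append(lengths[-2] + lengths[-1])
    let lengths := (List.range (n - 1).toNat).foldl stepLen [1, 1]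
    -- memo = {0: 0, 1: 1}; return value(n)
    let memo : PySem.Dict Int Int := (PySem.Dict.empty.insert 0 0).insert 1 1
    (valueGo lengths n.toNat memo).2

-- ===== PRECONDITION & SPEC =====
-- A raises UnboundLocalError on every negative n (the loop never runs, `fn` stays unbound)
def Pre_binary_fibonacci (n : Int) : Prop := 0 ≤ n
instance (n : Int) : Decidable (Pre_binary_fibonacci n) := by unfold Pre_binary_fibonacci; infer_instance
def pvWitness_binary_fibonacci : Int := 5

def Spec_binary_fibonacci (n : Int) (out : Int) : Prop := out = binary_fibonacci_alt n
instance (n : Int) (out : Int) : Decidable (Spec_binary_fibonacci n out) := by unfold Spec_binary_fibonacci; infer_instance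

-- ===== CLAIM (what is proved, stated in full; the proofs are below) =====
def Claim_equal_binary_fibonacci : Prop := ∀ (n : Int), Dom_binary_fibonacci n → Pre_binary_fibonacci n → Spec_binary_fibonacci n (binary_fibonacci n)

-- ===== LEMMAS AND PROOFS =====

-- bit lengths of the binary Fibonacci words (the Fibonacci numbers)
def fibLen : Nat → Nat
  | 0 => 1
  | 1 => 1
  | (k + 2) => fibLen k + fibLen (k + 1)

-- values of the binary Fibonacci words
def fibVal : Nat → Int
  | 0 => 0
  | 1 => 1
  | (k + 2) => fibVal (k + 1) * 2 ^ fibLen k + fibVal k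

theorem size_eq_log2 (m : ℕ) (hm : m ≠ 0) : Nat.size m = Nat.log2 m + 1 := by
  apply le_antisymm
  · exact Nat.size_le.2 Nat.lt_log2_self
  · exact Nat.lt_size.2 (Nat.log2_self_le hm)

-- the port's log2-based bit length is Nat.size, the form the lemmas below use
theorem noOfBits_eq (n : Int) : noOfBits n = if n = 0 then 1 else (Nat.size n.natAbs : Int) := by
  unfold noOfBits
  by_cases h : n = 0
  · simp [h]
  · rw [if_neg h, if_neg h, size_eq_log2 _ (by simpa using h)]

-- bit-length of a*2^b + c (a ≥ 1, c < 2^b) is bit-length of a plus b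
theorem size_mul_pow_add (a b c : ℕ) (ha : 1 ≤ a) (hc : c < 2 ^ b) :
    Nat.size (a * 2 ^ b + c) = Nat.size a + b := by
  apply le_antisymm
  · rw [Nat.size_le, pow_add]
    have h1 : a + 1 ≤ 2 ^ Nat.size a := Nat.lt_size_self a
    calc a * 2 ^ b + c < (a + 1) * 2 ^ b := by nlinarith
    _ ≤ 2 ^ Nat.size a * 2 ^ b := by
        exact Nat.mul_le_mul_right _ h1
  · have hpos : 0 < Nat.size a := Nat.size_pos.2 ha
    have h2 : 2 ^ (Nat.size a - 1) ≤ a := Nat.lt_size.1 (by omega)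
    have : Nat.size a - 1 + b < Nat.size (a * 2 ^ b + c) := by
      rw [Nat.lt_size, pow_add]
      calc 2 ^ (Nat.size a - 1) * 2 ^ b ≤ a * 2 ^ b := Nat.mul_le_mul_right _ h2
      _ ≤ a * 2 ^ b + c := Nat.le_add_right _ _
    omega

-- disjoint or is addition (on naturals)
theorem lor_disjoint (a b c : ℕ) (hc : c < 2 ^ b) : a * 2 ^ b ||| c = a * 2 ^ b + c := by
  rw [mul_comm]
  exact (Nat.two_pow_add_eq_or_of_lt hc a).symm

theorem lt_two_pow_noOfBits (f : Int) (hf : 0 ≤ f) : f < 2 ^ (noOfBits f).toNat := by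
  by_cases h : f = 0
  · simp [h, noOfBits_eq]
  · have hf1 : 1 ≤ f := by omega
    have : f.natAbs < 2 ^ Nat.size f.natAbs := Nat.lt_size_self _
    simp only [noOfBits_eq, h, if_false]
    rw [Int.toNat_natCast]
    have h2 : (f.natAbs : Int) < 2 ^ Nat.size f.natAbs := by exact_mod_cast this
    rw [Int.natAbs_of_nonneg hf] at h2
    exact h2

-- joint facts about the spec sequence: positivity and the bit-length law
theorem fibVal_facts (k : Nat) :
    0 ≤ fibVal k ∧ 1 ≤ fibVal (k + 1) ∧
    noOfBits (fibVal k) = (fibLen k : Int) ∧ noOfBits (fibVal (k + 1)) = (fibLen (k + 1) : Int) := by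
  induction k with
  | zero => exact ⟨by norm_num [fibVal], by norm_num [fibVal], by decide, by decide⟩
  | succ k ih =>
    obtain ⟨h0, h1, hn0, hn1⟩ := ih
    have hlt : fibVal k < 2 ^ fibLen k := by
      have := lt_two_pow_noOfBits (fibVal k) h0
      rwa [hn0, Int.toNat_natCast] at this
    obtain ⟨a, ha⟩ : ∃ a : ℕ, fibVal (k + 1) = (a : Int) := ⟨(fibVal (k + 1)).toNat, by omega⟩
    obtain ⟨c, hcv⟩ : ∃ c : ℕ, fibVal k = (c : Int) := ⟨(fibVal k).toNat, by omega⟩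
    have ha1 : 1 ≤ a := by rw [ha] at h1; exact_mod_cast h1
    have hc : c < 2 ^ fibLen k := by rw [hcv] at hlt; exact_mod_cast hlt
    have hv2 : fibVal (k + 2) = ((a * 2 ^ fibLen k + c : ℕ) : Int) := by
      show fibVal (k + 1) * 2 ^ fibLen k + fibVal k = _
      rw [ha, hcv]; push_cast; ring
    have hne : (a * 2 ^ fibLen k + c : ℕ) ≠ 0 := by positivity
    have hsz : Nat.size (a * 2 ^ fibLen k + c) = Nat.size a + fibLen k :=
      size_mul_pow_add a (fibLen k) c ha1 hc
    have hsa : (Nat.size a : Int) = (fibLen (k + 1) : Int) := by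
      rw [← hn1, ha, noOfBits_eq,
        if_neg (by exact_mod_cast Nat.one_le_iff_ne_zero.1 ha1), Int.natAbs_natCast]
    refine ⟨by omega, ?_, hn1, ?_⟩
    · rw [hv2]
      have : 1 ≤ a * 2 ^ fibLen k + c := by
        have := Nat.mul_pos ha1 (Nat.two_pow_pos (fibLen k)); omega
      exact_mod_cast this
    · rw [hv2, noOfBits_eq, if_neg (by exact_mod_cast hne), Int.natAbs_natCast, hsz]
      show ((Nat.size a : Int)) + (fibLen k : Int) = _
      rw [hsa]
      have : fibLen (k + 2) = fibLen k + fibLen (k + 1) := rfl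
      rw [this]; push_cast; ring

-- one A-step moves the spec pair forward
theorem stepA_fibVal (k : Nat) (x : Int) (y : Nat) :
    stepA (fibVal k, fibVal (k + 1), x) y = (fibVal (k + 1), fibVal (k + 2), fibVal (k + 2)) := by
  obtain ⟨h0, h1, hn0, _⟩ := fibVal_facts k
  have hlt : fibVal k < 2 ^ fibLen k := by
    have := lt_two_pow_noOfBits (fibVal k) h0
    rwa [hn0, Int.toNat_natCast] at this
  obtain ⟨a, ha⟩ : ∃ a : ℕ, fibVal (k + 1) = (a : Int) := ⟨(fibVal (k + 1)).toNat, by omega⟩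
  obtain ⟨c, hcv⟩ : ∃ c : ℕ, fibVal k = (c : Int) := ⟨(fibVal k).toNat, by omega⟩
  have hc : c < 2 ^ fibLen k := by rw [hcv] at hlt; exact_mod_cast hlt
  have hlor : Int.lor (fibVal (k + 1) * 2 ^ fibLen k) (fibVal k)
      = fibVal (k + 1) * 2 ^ fibLen k + fibVal k := by
    rw [ha, hcv]
    have hcast : ((a : Int) * 2 ^ fibLen k) = ((a * 2 ^ fibLen k : ℕ) : Int) := by push_cast; ring
    rw [hcast]
    show (((a * 2 ^ fibLen k) ||| c : ℕ) : Int) = _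
    rw [lor_disjoint a (fibLen k) c hc]
    push_cast; ring
  show (fibVal (k + 1), Int.lor (fibVal (k + 1) * 2 ^ (noOfBits (fibVal k)).toNat) (fibVal k), _) = _
  rw [hn0, Int.toNat_natCast, hlor]
  rfl

-- folding A's loop from the spec pair lands on the spec pair
theorem foldA_fibVal (l : List Nat) : ∀ (k : Nat) (x : Int),
    (l.foldl stepA (fibVal k, fibVal (k + 1), x)).2.1 = fibVal (k + l.length + 1) := by
  induction l with
  | nil => intro k x; simp
  | cons y l ih =>
    intro k x
    simp only [List.foldl_cons, List.length_cons]
    rw [stepA_fibVal k x y]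
    have := ih (k + 1) (fibVal (k + 2))
    convert this using 3; omega

theorem foldA_third (l : List ℕ) (st : Int × Int × Int) (hl : l ≠ []) :
    (l.foldl stepA st).2.2 = (l.foldl stepA st).2.1 := by
  induction l generalizing st with
  | nil => exact absurd rfl hl
  | cons y l ih =>
    simp only [List.foldl_cons]
    by_cases h : l = []
    · subst h; simp [stepA]
    · exact ih _ h

-- B's length table is the Fibonacci table
theorem lenList_eq (m : Nat) :
    (List.range m).foldl stepLen [1, 1] = (List.range (m + 2)).map (fun i => (fibLen i : Int)) := by
  induction m with
  | zero => decide
  | succ m ih =>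
    rw [List.range_succ, List.foldl_append, ih]
    simp only [List.foldl_cons, List.foldl_nil, stepLen]
    have hlen : ((List.range (m + 2)).map (fun i => (fibLen i : Int))).length = m + 2 := by simp
    have hget : ∀ j, j < m + 2 →
        ((List.range (m + 2)).map (fun i => (fibLen i : Int))).getD j 0 = (fibLen j : Int) := by
      intro j hj
      rw [List.getD_eq_getElem?_getD, List.getElem?_map, List.getElem?_range hj]
      rfl
    rw [hlen, show m + 2 - 2 = m from rfl, show m + 2 - 1 = m + 1 from by omega,
      hget m (by omega), hget (m + 1) (by omega)]
    conv_rhs => rw [show m + 1 + 2 = (m + 2) + 1 from rfl, List.range_succ, List.map_append]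
    congr 1

-- the memo invariant: every stored entry is the corresponding spec value
def MemoInv (memo : PySem.Dict Int Int) : Prop :=
  ∀ (j : Nat) (v : Int), memo.get? (j : Int) = some v → v = fibVal j

theorem valueGo_correct (lengths : List Int) (T : Nat)
    (hlen : ∀ j, j < T → lengths.getD j 0 = (fibLen j : Int)) :
    ∀ k, k ≤ T + 1 → ∀ memo, MemoInv memo →
      (valueGo lengths k memo).2 = fibVal k ∧ MemoInv (valueGo lengths k memo).1 := by
  intro k
  induction k using Nat.strong_induction_on with
  | _ k ih =>
    intro hk memo hm
    rw [valueGo.eq_def]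
    dsimp only
    cases hget : memo.get? (k : Int) with
    | some v => exact ⟨hm k v hget, hm⟩
    | none =>
      dsimp only
      match k, hk with
      | 0, _ => exact ⟨rfl, hm⟩
      | 1, _ => exact ⟨rfl, hm⟩
      | (k' + 2), hk =>
        have h1 := ih (k' + 1) (by omega) (by omega) memo hm
        have h2 := ih k' (by omega) (by omega) _ h1.2
        simp only [h1.1, h2.1]
        have hL : lengths.getD k' 0 = (fibLen k' : Int) := hlen k' (by omega)
        have hv : fibVal (k' + 1) * 2 ^ ((lengths.getD k' 0).toNat) + fibVal k'
            = fibVal (k' + 2) := by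
          rw [hL, Int.toNat_natCast]; rfl
        constructor
        · exact hv
        · intro j v hj
          rw [PySem.Dict.get?_insert] at hj
          by_cases hjk : (j : Int) = ((k' + 2 : Nat) : Int)
          · have : j = k' + 2 := by exact_mod_cast hjk
            rw [if_pos hjk] at hj
            cases hj
            rw [this, ← hv]
          · rw [if_neg hjk] at hj
            exact h2.2 j v hj

-- the initial memo {0: 0, 1: 1} satisfies the invariant
theorem memoInit : MemoInv ((PySem.Dict.empty.insert 0 0).insert 1 1) := by
  intro j v h
  rw [PySem.Dict.get?_insert] at h
  by_cases h1 : (j : Int) = 1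
  · have : j = 1 := by exact_mod_cast h1
    rw [if_pos h1] at h; cases h; rw [this]; rfl
  · rw [if_neg h1, PySem.Dict.get?_insert] at h
    by_cases h0 : (j : Int) = 0
    · have : j = 0 := by exact_mod_cast h0
      rw [if_pos h0] at h; cases h; rw [this]; rfl
    · rw [if_neg h0] at h
      simp [PySem.Dict.get?_empty] at h

-- ===== VERDICT (by name: the statement is the Claim_ definition above) =====
theorem binary_fibonacci_spec : Claim_equal_binary_fibonacci := by
  intro n _ hpre
  unfold Spec_binary_fibonacci binary_fibonacci binary_fibonacci_alt
  by_cases h0 : n = 0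
  · simp [h0]
  by_cases h1 : n = 1
  · simp [h1]
  rw [if_neg h0, if_neg h1, if_neg h0, if_neg h1]
  have hn2 : 2 ≤ n := by unfold Pre_binary_fibonacci at hpre; omega
  set m := (n - 1).toNat with hm
  have hmn : n.toNat = m + 1 := by omega
  -- A's side: the loop lands on fibVal n
  have hne : List.range' 2 m ≠ [] := by
    rw [Ne, List.range'_eq_nil_iff]; omega
  have hA : ((List.range' 2 m).foldl stepA (0, 1, 0)).2.2 = fibVal (m + 1) := by
    rw [foldA_third _ _ hne]
    have := foldA_fibVal (List.range' 2 m) 0 0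
    simpa using this
  -- B's side: the memoized recursion computes fibVal n
  have hB : (valueGo ((List.range m).foldl stepLen [1, 1]) n.toNat
      ((PySem.Dict.empty.insert 0 0).insert 1 1)).2 = fibVal (m + 1) := by
    rw [lenList_eq m, hmn]
    have hlen : ∀ j, j < m + 2 →
        ((List.range (m + 2)).map (fun i => (fibLen i : Int))).getD j 0 = (fibLen j : Int) := by
      intro j hj
      rw [List.getD_eq_getElem?_getD, List.getElem?_map, List.getElem?_range hj]
      rfl
    exact (valueGo_correct _ (m + 2) hlen (m + 1) (by omega) _ memoInit).1
  rw [hA]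
  exact hB.symm
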